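-- pv_equiv track=rewrite | github.com/jinga80/medical_law | compliance_checker/analyzer.py | _find_paragraph_number
-- ===== SOURCE A (Python) =====
-- def _find_paragraph_number(text: str, position: int) -> int:
--     """문단 번호 찾기"""
--     paragraphs = text.split('\n\n')
--     char_count = 0
--     for i, paragraph in enumerate(paragraphs):
--         if char_count + len(paragraph) + 2 >= position:  # +2 for \n\n
--             return i + 1
--         char_count += len(paragraph) + 2
--     return len(paragraphs)
-- ===== SOURCE B (Python) =====
-- def _find_paragraph_number(text: str, position: int) -> int:
--     """Paragraph number containing a character position: prefix sums + binary search."""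
--     paragraphs = text.split('\n\n')
--     cum = []
--     total = 0
--     for p in paragraphs:
--         total += len(p) + 2  # +2 for \n\n
--         cum.append(total)
--     # bisect_left over the sorted cumulative offsets
--     lo, hi = 0, len(cum)
--     while lo < hi:
--         mid = (lo + hi) // 2
--         if cum[mid] < position:
--             lo = mid + 1
--         else:
--             hi = mid
--     return min(lo + 1, len(paragraphs))
-- ===== Notes on version B (the rewrite author's own statement) =====
-- stated objective: alternative
-- what changed: Replaces the early-return linear scan with a precomputed prefix-sum array of cumulative paragraph offsets followed by a binary search (bisect_left by hand) for the first offset reaching the position, capped at the paragraph count.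
import Mathlib
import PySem

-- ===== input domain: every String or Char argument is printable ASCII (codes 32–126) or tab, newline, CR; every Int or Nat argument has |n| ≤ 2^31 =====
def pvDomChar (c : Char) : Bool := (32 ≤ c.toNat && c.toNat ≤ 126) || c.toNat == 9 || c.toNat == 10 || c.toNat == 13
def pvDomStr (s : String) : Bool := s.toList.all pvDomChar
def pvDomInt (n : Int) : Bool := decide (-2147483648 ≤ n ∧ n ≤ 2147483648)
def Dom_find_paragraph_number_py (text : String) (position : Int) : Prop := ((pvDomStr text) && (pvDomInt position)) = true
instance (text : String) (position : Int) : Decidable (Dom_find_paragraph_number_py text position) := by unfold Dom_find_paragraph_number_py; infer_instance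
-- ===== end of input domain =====

-- ===== PORT A =====
-- B replaces A's early-return linear scan with a prefix-sum array plus binary search (alternative decomposition, same return value).

-- the loop 'for i, paragraph in enumerate(paragraphs): …' with early return; n = len(paragraphs)
def pvGoA (n : Int) (position : Int) : List String → Int → Int → Int
  | [], _, _ => n
  | p :: rest, i, cc =>
      if cc + PySem.Str.len p + 2 ≥ position then i + 1
      else pvGoA n position rest (i + 1) (cc + PySem.Str.len p + 2)

def find_paragraph_number_py (text : String) (position : Int) : Int :=
  -- text.split('\n\n'): sep is the nonempty literal "\n\n", so split? is always some
  let paragraphs := (PySem.Str.split? text "\n\n").getD []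
  pvGoA (paragraphs.length : Int) position paragraphs 0 0

-- ===== PORT B =====
-- the cum-building loop of Source B
def pvCum : List String → Int → List Int
  | [], _ => []
  | p :: rest, total =>
      let t := total + PySem.Str.len p + 2
      t :: pvCum rest t

-- the hand-written bisect_left while-loop of Source B; lo, hi are Nat (0 ≤ lo ≤ hi),
-- so Python's (lo + hi) // 2 is exactly Nat division (lo + hi) / 2
def pvBisect (cum : List Int) (x : Int) (lo hi : Nat) : Nat :=
  if h : lo < hi then
    let mid := (lo + hi) / 2
    if cum.getD mid 0 < x then pvBisect cum x (mid + 1) hi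
    else pvBisect cum x lo mid
  else lo
termination_by hi - lo
decreasing_by
  · omega
  · omega

def find_paragraph_number_py_alt (text : String) (position : Int) : Int :=
  let paragraphs := (PySem.Str.split? text "\n\n").getD []
  let cum := pvCum paragraphs 0
  let lo := pvBisect cum position 0 cum.length
  min ((lo : Int) + 1) (paragraphs.length : Int)

-- ===== PRECONDITION & SPEC =====
def Spec_find_paragraph_number_py (text : String) (position : Int) (out : Int) : Prop := out = find_paragraph_number_py_alt text position
instance (text : String) (position : Int) (out : Int) : Decidable (Spec_find_paragraph_number_py text position out) := by unfold Spec_find_paragraph_number_py; infer_instance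

-- ===== CLAIM (what is proved, stated in full; the proofs are below) =====
def Claim_equal_find_paragraph_number_py : Prop := ∀ (text : String) (position : Int), Dom_find_paragraph_number_py text position → Spec_find_paragraph_number_py text position (find_paragraph_number_py text position)

-- ===== LEMMAS AND PROOFS =====

theorem pvCum_length (ps : List String) (t : Int) : (pvCum ps t).length = ps.length := by
  induction ps generalizing t with
  | nil => simp [pvCum]
  | cons p rest ih => simp [pvCum, ih]

-- every entry of pvCum ps t is ≥ t
theorem pvCum_lb (ps : List String) (t : Int) (j : Nat) (hj : j < ps.length) :
    t ≤ (pvCum ps t).getD j 0 := by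
  induction ps generalizing t j with
  | nil => simp at hj
  | cons p rest ih =>
      have hlen : (0:Int) ≤ PySem.Str.len p := by
        rw [PySem.Str.len_eq]; positivity
      cases j with
      | zero => simp [pvCum]; omega
      | succ j' =>
          simp only [pvCum, List.getD_cons_succ]
          have := ih (t + PySem.Str.len p + 2) j' (by simpa using hj)
          omega

-- pvCum is monotone (nondecreasing)
theorem pvCum_mono (ps : List String) (t : Int) (i j : Nat) (hij : i ≤ j) (hj : j < ps.length) :
    (pvCum ps t).getD i 0 ≤ (pvCum ps t).getD j 0 := by
  induction ps generalizing t i j with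
  | nil => simp at hj
  | cons p rest ih =>
      cases i with
      | zero =>
          cases j with
          | zero => simp
          | succ j' =>
              simp only [pvCum, List.getD_cons_zero, List.getD_cons_succ]
              exact pvCum_lb rest (t + PySem.Str.len p + 2) j' (by simpa using hj)
      | succ i' =>
          cases j with
          | zero => omega
          | succ j' =>
              simp only [pvCum, List.getD_cons_succ]
              exact ih (t + PySem.Str.len p + 2) i' j' (by omega) (by simpa using hj)

-- index of the first cum entry ≥ x (= length if none)
def pvFirstGe : List Int → Int → Nat
  | [], _ => 0
  | c :: rest, x => if c < x then pvFirstGe rest x + 1 else 0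

theorem pvFirstGe_le (cum : List Int) (x : Int) : pvFirstGe cum x ≤ cum.length := by
  induction cum with
  | nil => simp [pvFirstGe]
  | cons c rest ih =>
      simp only [pvFirstGe, List.length_cons]
      split
      · omega
      · omega

-- any k bracketing x the same way IS pvFirstGe
theorem pvFirstGe_eq (cum : List Int) (x : Int) (k : Nat)
    (hk : k ≤ cum.length)
    (hlt : ∀ i, i < k → cum.getD i 0 < x)
    (hge : k < cum.length → ¬ cum.getD k 0 < x) :
    pvFirstGe cum x = k := by
  induction cum generalizing k with
  | nil =>
      simp only [List.length_nil, Nat.le_zero] at hk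
      subst hk
      simp [pvFirstGe]
  | cons c rest ih =>
      cases k with
      | zero =>
          have := hge (by simp)
          simp only [List.getD_cons_zero] at this
          simp [pvFirstGe, this]
      | succ k' =>
          have hc : c < x := by simpa using hlt 0 (by omega)
          simp only [pvFirstGe, if_pos hc]
          have := ih k' (by simpa using hk)
            (fun i hi => by simpa using hlt (i + 1) (by omega))
            (fun h => by simpa using hge (by simpa using h))
          omega

-- the binary search computes pvFirstGe
theorem pvBisect_eq (cum : List Int) (x : Int)
    (hmono : ∀ i j, i ≤ j → j < cum.length → cum.getD i 0 ≤ cum.getD j 0)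
    (lo hi : Nat) (hlo : lo ≤ hi) (hhi : hi ≤ cum.length)
    (hl : ∀ i, i < lo → cum.getD i 0 < x)
    (hr : ∀ i, hi ≤ i → i < cum.length → ¬ cum.getD i 0 < x) :
    pvBisect cum x lo hi = pvFirstGe cum x := by
  induction lo, hi using pvBisect.induct cum x with
  | case1 lo hi h mid hc ih =>
      rw [pvBisect]
      simp only [h, dite_true]
      rw [if_pos (show cum.getD ((lo + hi) / 2) 0 < x from hc)]
      exact ih (by show (lo + hi) / 2 + 1 ≤ hi; omega) hhi
        (fun i hi' => lt_of_le_of_lt (hmono i ((lo + hi) / 2) (by omega) (by omega)) hc)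
        hr
  | case2 lo hi h mid hc ih =>
      rw [pvBisect]
      simp only [h, dite_true]
      rw [if_neg (show ¬ cum.getD ((lo + hi) / 2) 0 < x from hc)]
      exact ih (by show lo ≤ (lo + hi) / 2; omega) (by show (lo + hi) / 2 ≤ cum.length; omega) hl
        (fun i hmi hi' hlt => hc (lt_of_le_of_lt (hmono mid i hmi hi') hlt))
  | case3 lo hi h =>
      have hle : lo = hi := by omega
      subst hle
      rw [pvBisect, dif_neg h]
      exact (pvFirstGe_eq cum x lo hhi hl (fun hlt => hr lo (le_refl _) hlt)).symm

-- A's scan equals the first-index-≥ description over the cumulative sums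
theorem pvGoA_eq (n x : Int) (ps : List String) (i cc : Int) :
    pvGoA n x ps i cc =
      if pvFirstGe (pvCum ps cc) x < ps.length
      then i + 1 + (pvFirstGe (pvCum ps cc) x : Int)
      else n := by
  induction ps generalizing i cc with
  | nil => simp [pvGoA, pvCum, pvFirstGe]
  | cons p rest ih =>
      simp only [pvGoA, pvCum, pvFirstGe, List.length_cons]
      by_cases hlt : cc + PySem.Str.len p + 2 < x
      · simp only [if_pos hlt, if_neg (by omega : ¬ cc + PySem.Str.len p + 2 ≥ x), ih]
        split_ifs with h1 h2 h2
        · push_cast; ring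
        · omega
        · omega
        · rfl
      · simp only [if_neg hlt, if_pos (by omega : cc + PySem.Str.len p + 2 ≥ x),
          if_pos (by omega : 0 < rest.length + 1)]
        simp

-- the two pipelines agree for an arbitrary paragraph list
theorem pvMain (ps : List String) (x : Int) :
    pvGoA (ps.length : Int) x ps 0 0 =
      min ((pvBisect (pvCum ps 0) x 0 (pvCum ps 0).length : Int) + 1) (ps.length : Int) := by
  have hlen : (pvCum ps 0).length = ps.length := pvCum_length ps 0
  have hb : pvBisect (pvCum ps 0) x 0 (pvCum ps 0).length = pvFirstGe (pvCum ps 0) x := by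
    apply pvBisect_eq (pvCum ps 0) x
      (fun i j hij hj => pvCum_mono ps 0 i j hij (by omega))
      0 (pvCum ps 0).length (by omega) (le_refl _)
      (fun i hi => by omega)
      (fun i hi hi' => by omega)
  have hfl := pvFirstGe_le (pvCum ps 0) x
  rw [pvGoA_eq, hb]
  split_ifs with h
  · omega
  · omega

-- ===== VERDICT (by name: the statement is the Claim_ definition above) =====
theorem find_paragraph_number_py_spec : Claim_equal_find_paragraph_number_py := by
  intro text position _
  exact pvMain ((PySem.Str.split? text "\n\n").getD []) position
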